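-- pv_equiv track=rewrite | github.com/GBLUIUC/wordle-solver | wordle.py | generate_guess_candidates
-- ===== SOURCE A (Python) =====
-- def generate_guess_candidates(char_cand, guess_space, unguessed):
--
--     k = 5
--     guess_cands = []
--     while k <= len(unguessed):
--         guess_cands = []
--         for word in guess_space:
--             char_cands = char_cand[:k]
--             valid = True
--             for char in word:
--                 if char not in char_cands:
--                     valid = False
--                     break
--                 char_cands.remove(char)
--
--             if valid:
--                 guess_cands.append(word)
--
--         if guess_cands:
--             return guess_cands
--
--         k += 1
--
--     return ['error']
-- ===== SOURCE B (Python) =====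
-- def _spellable(word, chars):
--     avail = list(chars)
--     for ch in word:
--         if ch not in avail:
--             return False
--         avail.remove(ch)
--     return True
--
--
-- def _cands_at(char_cand, guess_space, k):
--     prefix = char_cand[:k]
--     return [w for w in guess_space if _spellable(w, prefix)]
--
--
-- def generate_guess_candidates(char_cand, guess_space, unguessed):
--     n = len(unguessed)
--     if n < 5 or not _cands_at(char_cand, guess_space, n):
--         return ['error']
--     # validity is monotone in k, so binary-search the smallest k in [5, n]
--     lo, hi = 5, n
--     while lo < hi:
--         mid = (lo + hi) // 2
--         if _cands_at(char_cand, guess_space, mid):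
--             hi = mid
--         else:
--             lo = mid + 1
--     return _cands_at(char_cand, guess_space, lo)
-- ===== Notes on version B (the rewrite author's own statement) =====
-- stated objective: faster
-- what changed: Instead of scanning candidate prefix sizes k = 5,6,7,... linearly and re-filtering the guess space at every k, B exploits that spellability is monotone in k and binary-searches the smallest valid k, then does one final collection pass.
import Mathlib
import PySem

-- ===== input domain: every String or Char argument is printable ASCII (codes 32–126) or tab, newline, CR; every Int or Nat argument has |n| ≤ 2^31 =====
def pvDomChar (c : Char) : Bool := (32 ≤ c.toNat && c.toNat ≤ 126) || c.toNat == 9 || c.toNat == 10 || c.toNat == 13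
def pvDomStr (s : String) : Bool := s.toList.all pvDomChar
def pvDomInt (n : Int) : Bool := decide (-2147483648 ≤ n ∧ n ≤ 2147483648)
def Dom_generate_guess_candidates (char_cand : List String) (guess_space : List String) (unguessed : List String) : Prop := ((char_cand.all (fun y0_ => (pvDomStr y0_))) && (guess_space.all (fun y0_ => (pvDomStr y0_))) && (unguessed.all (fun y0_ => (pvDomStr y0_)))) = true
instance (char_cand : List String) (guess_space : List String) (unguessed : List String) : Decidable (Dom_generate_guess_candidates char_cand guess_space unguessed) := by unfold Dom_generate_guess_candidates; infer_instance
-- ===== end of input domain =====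

-- B binary-searches the smallest valid prefix size k (spellability is monotone in k)
-- instead of A's linear scan over k; objective: fewer full filter passes over guess_space.

-- ===== PORT A =====
-- A's inner word loop: walk the word's chars, each must be present in the remaining
-- candidate chars and is removed (list.remove after a membership check = List.erase).
def pvValidA : List Char → List String → Bool
  | [], _ => true
  | c :: rest, avail =>
    let s := String.ofList [c]
    if s ∈ avail then pvValidA rest (avail.erase s) else false

-- one pass over guess_space at prefix size k (char_cand[:k] with k ≥ 0 = take k)
def pvCandsA (char_cand guess_space : List String) (k : Nat) : List String :=
  guess_space.foldl (fun acc w => if pvValidA w.toList (char_cand.take k) then acc ++ [w] else acc) []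

-- A's while loop over k = 5, 6, ..., n = len(unguessed); fuel = n + 1 - k makes the
-- recursion structural and is always sufficient, so the 'k ≤ n' test governs as in Python
def pvLoopA (char_cand guess_space : List String) (n : Nat) : Nat → Nat → List String
  | 0, _ => ["error"]
  | fuel + 1, k =>
    if k ≤ n then
      let g := pvCandsA char_cand guess_space k
      if g.isEmpty then pvLoopA char_cand guess_space n fuel (k + 1) else g
    else ["error"]

def generate_guess_candidates (char_cand : List String) (guess_space : List String) (unguessed : List String) : List String :=
  pvLoopA char_cand guess_space unguessed.length (unguessed.length + 1 - 5) 5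

-- ===== PORT B =====
-- B's _spellable helper (same consume-and-remove check, its own definition)
def pvSpellB : List Char → List String → Bool
  | [], _ => true
  | c :: rest, avail =>
    let s := String.ofList [c]
    if s ∈ avail then pvSpellB rest (avail.erase s) else false

-- B's _cands_at: list comprehension = filter
def pvCandsB (char_cand guess_space : List String) (k : Nat) : List String :=
  guess_space.filter (fun w => pvSpellB w.toList (char_cand.take k))

-- B's binary-search while loop; fuel = hi - lo is always sufficient, the 'lo < hi'
-- test governs exactly as in Python
def pvBsearch (char_cand guess_space : List String) : Nat → Nat → Nat → Nat
  | 0, lo, _ => lo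
  | fuel + 1, lo, hi =>
    if lo < hi then
      let mid := (lo + hi) / 2
      if (pvCandsB char_cand guess_space mid).isEmpty then
        pvBsearch char_cand guess_space fuel (mid + 1) hi
      else
        pvBsearch char_cand guess_space fuel lo mid
    else lo

def generate_guess_candidates_alt (char_cand : List String) (guess_space : List String) (unguessed : List String) : List String :=
  let n := unguessed.length
  if n < 5 then ["error"]
  else if (pvCandsB char_cand guess_space n).isEmpty then ["error"]
  else pvCandsB char_cand guess_space (pvBsearch char_cand guess_space (n - 5) 5 n)

-- ===== PRECONDITION & SPEC =====
def Spec_generate_guess_candidates (char_cand : List String) (guess_space : List String) (unguessed : List String) (out : List String) : Prop := out = generate_guess_candidates_alt char_cand guess_space unguessed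
instance (char_cand : List String) (guess_space : List String) (unguessed : List String) (out : List String) : Decidable (Spec_generate_guess_candidates char_cand guess_space unguessed out) := by unfold Spec_generate_guess_candidates; infer_instance

-- ===== CLAIM (what is proved, stated in full; the proofs are below) =====
def Claim_equal_generate_guess_candidates : Prop := ∀ (char_cand : List String) (guess_space : List String) (unguessed : List String), Dom_generate_guess_candidates char_cand guess_space unguessed → Spec_generate_guess_candidates char_cand guess_space unguessed (generate_guess_candidates char_cand guess_space unguessed)

-- ===== LEMMAS AND PROOFS =====

theorem pvValidA_eq_spellB (w : List Char) (avail : List String) :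
    pvValidA w avail = pvSpellB w avail := by
  induction w generalizing avail with
  | nil => rfl
  | cons c rest ih => simp [pvValidA, pvSpellB, ih]

theorem pvCandsA_eq_B (cc gs : List String) (k : Nat) :
    pvCandsA cc gs k = pvCandsB cc gs k := by
  simp [pvCandsA, pvCandsB, pvValidA_eq_spellB, PySem.List.foldl_append_if]

-- spellability is monotone under appending extra candidate chars
theorem pvSpellB_append (w : List Char) (avail extra : List String)
    (h : pvSpellB w avail = true) : pvSpellB w (avail ++ extra) = true := by
  induction w generalizing avail with
  | nil => rfl
  | cons c rest ih =>
    simp only [pvSpellB] at h ⊢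
    by_cases hm : String.ofList [c] ∈ avail
    · rw [if_pos hm] at h
      rw [if_pos (List.mem_append_left _ hm), List.erase_append_left _ hm]
      exact ih _ h
    · rw [if_neg hm] at h; exact absurd h (by simp)

theorem pvSpellB_take_mono (cc : List String) (w : List Char) {k k' : Nat}
    (hk : k ≤ k') (h : pvSpellB w (cc.take k) = true) :
    pvSpellB w (cc.take k') = true := by
  have : cc.take k' = cc.take k ++ (cc.drop k).take (k' - k) := by
    rw [← List.take_add]; congr 1; omega
  rw [this]; exact pvSpellB_append _ _ _ h

theorem pvCandsB_mono (cc gs : List String) {k k' : Nat} (hk : k ≤ k')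
    (h : (pvCandsB cc gs k).isEmpty = false) :
    (pvCandsB cc gs k').isEmpty = false := by
  simp only [pvCandsB, List.isEmpty_eq_false_iff, ne_eq, List.filter_eq_nil_iff, not_forall] at h ⊢
  obtain ⟨w, hw, hval⟩ := h
  exact ⟨w, hw, fun hc => hc (pvSpellB_take_mono cc _ hk (by simpa using hval))⟩

-- binary search (with sufficient fuel): bounds, validity at result, minimality
theorem pvBsearch_bounds (cc gs : List String) (fuel : Nat) :
    ∀ lo hi, lo ≤ hi → hi - lo ≤ fuel →
      lo ≤ pvBsearch cc gs fuel lo hi ∧ pvBsearch cc gs fuel lo hi ≤ hi := by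
  induction fuel with
  | zero => intro lo hi h hf; simp [pvBsearch]; omega
  | succ fuel ih =>
    intro lo hi h hf
    by_cases hlt : lo < hi
    · rw [pvBsearch, if_pos hlt]
      by_cases hemp : (pvCandsB cc gs ((lo + hi) / 2)).isEmpty
      · rw [if_pos hemp]
        have := ih ((lo + hi) / 2 + 1) hi (by omega) (by omega)
        constructor <;> omega
      · rw [if_neg hemp]
        have := ih lo ((lo + hi) / 2) (by omega) (by omega)
        constructor <;> omega
    · rw [pvBsearch, if_neg hlt]; omega

theorem pvBsearch_ok (cc gs : List String) (fuel : Nat) :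
    ∀ lo hi, lo ≤ hi → hi - lo ≤ fuel → (pvCandsB cc gs hi).isEmpty = false →
      (pvCandsB cc gs (pvBsearch cc gs fuel lo hi)).isEmpty = false := by
  induction fuel with
  | zero =>
    intro lo hi h hf hok
    have : lo = hi := by omega
    rw [pvBsearch, this]; exact hok
  | succ fuel ih =>
    intro lo hi h hf hok
    by_cases hlt : lo < hi
    · rw [pvBsearch, if_pos hlt]
      by_cases hemp : (pvCandsB cc gs ((lo + hi) / 2)).isEmpty
      · rw [if_pos hemp]; exact ih _ _ (by omega) (by omega) hok
      · rw [if_neg hemp]; exact ih _ _ (by omega) (by omega) (by simpa using hemp)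
    · rw [pvBsearch, if_neg hlt]
      have : lo = hi := by omega
      rwa [this]

theorem pvBsearch_min (cc gs : List String) (fuel : Nat) :
    ∀ lo hi, lo ≤ hi → hi - lo ≤ fuel →
      ∀ j, lo ≤ j → j < pvBsearch cc gs fuel lo hi → (pvCandsB cc gs j).isEmpty = true := by
  induction fuel with
  | zero => intro lo hi h hf j hj hjlt; rw [pvBsearch] at hjlt; omega
  | succ fuel ih =>
    intro lo hi h hf j hj hjlt
    by_cases hlt : lo < hi
    · rw [pvBsearch, if_pos hlt] at hjlt
      by_cases hemp : (pvCandsB cc gs ((lo + hi) / 2)).isEmpty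
      · rw [if_pos hemp] at hjlt
        by_cases hjm : j ≤ (lo + hi) / 2
        · -- j ≤ mid and the mid pass is empty: by monotonicity j's pass is empty
          by_contra hne
          have := pvCandsB_mono cc gs hjm (by simpa using hne)
          simp [hemp] at this
        · exact ih _ _ (by omega) (by omega) j (by omega) hjlt
      · rw [if_neg hemp] at hjlt
        exact ih _ _ (by omega) (by omega) j hj hjlt
    · rw [pvBsearch, if_neg hlt] at hjlt; omega

-- A's loop returns 'error' when every prefix size in range yields nothing
theorem pvLoopA_all_empty (cc gs : List String) (n : Nat) (fuel : Nat) :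
    ∀ k, (∀ j, k ≤ j → j ≤ n → (pvCandsA cc gs j).isEmpty = true) →
      pvLoopA cc gs n fuel k = ["error"] := by
  induction fuel with
  | zero => intro k _; rfl
  | succ fuel ih =>
    intro k hall
    by_cases hle : k ≤ n
    · rw [pvLoopA, if_pos hle, if_pos (hall k (le_refl k) hle)]
      exact ih (k + 1) fun j h1 h2 => hall j (by omega) h2
    · rw [pvLoopA, if_neg hle]

-- A's loop returns the candidates at the least nonempty prefix size r
theorem pvLoopA_finds (cc gs : List String) (n r : Nat)
    (hrn : r ≤ n) (hok : (pvCandsA cc gs r).isEmpty = false) (fuel : Nat) :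
    ∀ k, k ≤ r → r < fuel + k → (∀ j, k ≤ j → j < r → (pvCandsA cc gs j).isEmpty = true) →
      pvLoopA cc gs n fuel k = pvCandsA cc gs r := by
  induction fuel with
  | zero => intro k hkr hf hmin; omega
  | succ fuel ih =>
    intro k hkr hf hmin
    by_cases hkeq : k = r
    · rw [pvLoopA, if_pos (by omega : k ≤ n), hkeq]
      rw [if_neg (by rw [hok]; exact Bool.false_ne_true)]
    · have hemp : (pvCandsA cc gs k).isEmpty = true := hmin k (le_refl k) (by omega)
      rw [pvLoopA, if_pos (by omega : k ≤ n), if_pos hemp]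
      exact ih (k + 1) (by omega) (by omega) fun j h1 h2 => hmin j (by omega) h2

-- ===== VERDICT (by name: the statement is the Claim_ definition above) =====
theorem generate_guess_candidates_spec : Claim_equal_generate_guess_candidates := by
  intro cc gs ung _
  unfold Spec_generate_guess_candidates generate_guess_candidates generate_guess_candidates_alt
  set n := ung.length with hn
  by_cases h5 : n < 5
  · rw [if_pos h5]
    exact pvLoopA_all_empty cc gs n _ 5 (fun j h1 h2 => by omega)
  · rw [if_neg h5]
    by_cases hemp : (pvCandsB cc gs n).isEmpty
    · rw [if_pos hemp]
      refine pvLoopA_all_empty cc gs n _ 5 (fun j h1 h2 => ?_)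
      rw [pvCandsA_eq_B]
      by_contra hne
      have := pvCandsB_mono cc gs h2 (by simpa using hne)
      simp [hemp] at this
    · rw [if_neg hemp]
      have hemp' : (pvCandsB cc gs n).isEmpty = false := by simpa using hemp
      have hlon : 5 ≤ n := by omega
      obtain ⟨hlo, hhi⟩ := pvBsearch_bounds cc gs (n - 5) 5 n hlon (by omega)
      have hok := pvBsearch_ok cc gs (n - 5) 5 n hlon (by omega) hemp'
      have hmin := pvBsearch_min cc gs (n - 5) 5 n hlon (by omega)
      rw [pvLoopA_finds cc gs n (pvBsearch cc gs (n - 5) 5 n) hhi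
        (by rw [pvCandsA_eq_B]; exact hok) (n + 1 - 5) 5 hlo (by omega)
        (fun j h1 h2 => by rw [pvCandsA_eq_B]; exact hmin j h1 h2)]
      exact pvCandsA_eq_B cc gs _
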